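-- pv_equiv track=rewrite | github.com/esemsc-dda24/PTL-PINNs | ptlpinns/models/transfer_kpp.py | force_func_perturbation3
-- ===== SOURCE A (Python) =====
-- def force_func_perturbation3(n):
--     solution_index = [] # ind1, ind2, ind3, coeff
--     for a in range(n+1):
--         for b in range(a+1):
--               for c in range(b+1):
--                 if ((a+b+c)==n):
--                     if ((a==b) & (b==c)):
--                         solution_index.append([a, b, c, 1])
--                     elif ((a!=b) & (b!=c)):
--                         solution_index.append([a, b, c, 6])
--                     else:
--                         solution_index.append([a, b, c, 3])
--     return solution_index
-- ===== SOURCE B (Python) =====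
-- def force_func_perturbation3(n):
--     def coeff(a, b, c):
--         if a == c:
--             return 1
--         if a == b or b == c:
--             return 3
--         return 6
--     return [[a, b, n - a - b, coeff(a, b, n - a - b)]
--             for a in range(n + 1)
--             for b in range(max(0, -((a - n) // 2)), min(a, n - a) + 1)]
-- ===== Notes on version B (the rewrite author's own statement) =====
-- stated objective: faster
-- what changed: B replaces A's triple nested scan-and-filter by a flat comprehension over (a,b) with closed-form b-bounds max(0, ceil((n-a)/2)) .. min(a, n-a), computing c = n-a-b directly and the multiplicity by an equality test a==c / one-equality test, so no candidate is ever filtered out.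
import Mathlib
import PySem

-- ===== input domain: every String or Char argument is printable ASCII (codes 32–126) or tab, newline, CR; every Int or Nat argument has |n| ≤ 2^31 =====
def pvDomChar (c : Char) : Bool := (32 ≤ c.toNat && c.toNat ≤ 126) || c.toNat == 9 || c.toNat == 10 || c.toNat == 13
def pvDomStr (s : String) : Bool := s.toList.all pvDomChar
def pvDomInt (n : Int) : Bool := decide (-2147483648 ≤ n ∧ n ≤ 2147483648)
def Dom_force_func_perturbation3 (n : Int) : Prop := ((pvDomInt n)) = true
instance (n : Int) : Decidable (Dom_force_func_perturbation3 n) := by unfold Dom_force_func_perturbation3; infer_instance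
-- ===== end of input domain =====

-- B replaces A's triple scan-and-filter by a flat comprehension over (a,b) with
-- closed-form b-bounds, computing c = n-a-b directly: O(n^2) instead of O(n^3).

-- ===== PORT A =====
def force_func_perturbation3 (n : Int) : List (List Int) :=
  (PySem.List.pyRange 0 (n+1) 1).foldl (fun acc a =>
    (PySem.List.pyRange 0 (a+1) 1).foldl (fun acc b =>
      (PySem.List.pyRange 0 (b+1) 1).foldl (fun acc c =>
        if a + b + c = n then
          if a = b ∧ b = c then acc ++ [[a, b, c, 1]]
          else if a ≠ b ∧ b ≠ c then acc ++ [[a, b, c, 6]]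
          else acc ++ [[a, b, c, 3]]
        else acc) acc) acc) []

-- ===== PORT B =====
-- helper 'coeff' of Source B
def pvCoeffB (a b c : Int) : Int :=
  if a = c then 1
  else if a = b ∨ b = c then 3
  else 6

def force_func_perturbation3_alt (n : Int) : List (List Int) :=
  (PySem.List.pyRange 0 (n+1) 1).flatMap (fun a =>
    (PySem.List.pyRange (max 0 (-(PySem.Int.floordiv (a - n) 2))) (min a (n - a) + 1) 1).map
      (fun b => [a, b, n - a - b, pvCoeffB a b (n - a - b)]))

-- ===== PRECONDITION & SPEC =====
def Spec_force_func_perturbation3 (n : Int) (out : List (List Int)) : Prop := out = force_func_perturbation3_alt n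
instance (n : Int) (out : List (List Int)) : Decidable (Spec_force_func_perturbation3 n out) := by unfold Spec_force_func_perturbation3; infer_instance

-- ===== CLAIM (what is proved, stated in full; the proofs are below) =====
def Claim_equal_force_func_perturbation3 : Prop := ∀ (n : Int), Dom_force_func_perturbation3 n → Spec_force_func_perturbation3 n (force_func_perturbation3 n)

-- ===== LEMMAS AND PROOFS =====

-- A fold over range(k) that appends g c exactly when c = t appends g t iff 0 ≤ t < k.
theorem pv_inner_fold (t : Int) (g : Int → List (List Int)) (k : Nat) (acc : List (List Int)) :
    (PySem.List.pyRange 0 (k : Int) 1).foldl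
      (fun acc c => if c = t then acc ++ g c else acc) acc
    = if 0 ≤ t ∧ t < (k : Int) then acc ++ g t else acc := by
  induction k with
  | zero =>
    rw [PySem.List.pyRange_one_eq_nil (by norm_num)]
    simp only [List.foldl_nil]
    rw [if_neg (by omega)]
  | succ k ih =>
    have hk : ((k + 1 : Nat) : Int) = (k : Int) + 1 := by push_cast; ring
    rw [hk, PySem.List.pyRange_one_succ_right (by positivity), List.foldl_append, ih]
    simp only [List.foldl_cons, List.foldl_nil]
    by_cases h : (k : Int) = t
    · subst h
      rw [if_pos rfl, if_neg (show ¬(0 ≤ (k:Int) ∧ (k:Int) < (k:Int)) by omega),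
        if_pos (show 0 ≤ (k:Int) ∧ (k:Int) < (k:Int) + 1 by omega)]
    · rw [if_neg h]
      by_cases h2 : 0 ≤ t ∧ t < (k : Int)
      · rw [if_pos h2, if_pos (by omega)]
      · rw [if_neg h2, if_neg (by omega)]

-- filtering an int range by a closed interval [lo,hi] yields the subrange, when [lo,hi+1] ⊆ [s,e]
theorem pv_filter_range (s e lo hi : Int) (hs : s ≤ lo) (he : hi + 1 ≤ e) :
    (PySem.List.pyRange s e 1).filter (fun b => decide (lo ≤ b ∧ b ≤ hi))
      = PySem.List.pyRange lo (hi + 1) 1 := by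
  by_cases hle : lo ≤ hi + 1
  · rw [PySem.List.pyRange_one_append s lo e hs (by omega),
        PySem.List.pyRange_one_append lo (hi + 1) e hle he,
        List.filter_append, List.filter_append]
    have h1 : (PySem.List.pyRange s lo 1).filter (fun b => decide (lo ≤ b ∧ b ≤ hi)) = [] := by
      apply List.filter_eq_nil_iff.mpr
      intro b hb
      have := PySem.List.mem_pyRange_one.mp hb
      simp only [decide_eq_true_eq]; omega
    have h2 : (PySem.List.pyRange lo (hi+1) 1).filter (fun b => decide (lo ≤ b ∧ b ≤ hi))
        = PySem.List.pyRange lo (hi+1) 1 := by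
      apply List.filter_eq_self.mpr
      intro b hb
      have := PySem.List.mem_pyRange_one.mp hb
      simp only [decide_eq_true_eq]; omega
    have h3 : (PySem.List.pyRange (hi+1) e 1).filter (fun b => decide (lo ≤ b ∧ b ≤ hi)) = [] := by
      apply List.filter_eq_nil_iff.mpr
      intro b hb
      have := PySem.List.mem_pyRange_one.mp hb
      simp only [decide_eq_true_eq]; omega
    rw [h1, h2, h3, List.nil_append, List.append_nil]
  · rw [show PySem.List.pyRange lo (hi + 1) 1 = [] from PySem.List.pyRange_one_eq_nil (by omega)]
    apply List.filter_eq_nil_iff.mpr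
    intro b hb
    have := PySem.List.mem_pyRange_one.mp hb
    simp only [decide_eq_true_eq]; omega

-- the b-row A emits equals the b-row B emits, for b in B's range
theorem pv_row_eq (n a b : Int)
    (hb : b ∈ PySem.List.pyRange (max 0 (-(PySem.Int.floordiv (a - n) 2))) (min a (n - a) + 1) 1) :
    (if a = b ∧ b = n - a - b then [a, b, n - a - b, 1]
     else if a ≠ b ∧ b ≠ n - a - b then [a, b, n - a - b, 6]
     else [a, b, n - a - b, 3])
    = [a, b, n - a - b, pvCoeffB a b (n - a - b)] := by
  obtain ⟨h1, h2⟩ := PySem.List.mem_pyRange_one.mp hb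
  have hfd : PySem.Int.floordiv (a - n) 2 = (a - n) / 2 :=
    PySem.Int.floordiv_eq_ediv_of_pos (by norm_num)
  rw [hfd] at h1
  have hba : b ≤ a := by omega
  have hcb : n - a - b ≤ b := by omega
  unfold pvCoeffB
  by_cases hac : a = n - a - b
  · rw [if_pos (show a = b ∧ b = n - a - b by omega), if_pos hac]
  · rw [if_neg (show ¬(a = b ∧ b = n - a - b) by omega), if_neg hac]
    by_cases h3 : a = b ∨ b = n - a - b
    · rw [if_neg (show ¬(a ≠ b ∧ b ≠ n - a - b) by tauto), if_pos h3]
    · rw [if_pos (show a ≠ b ∧ b ≠ n - a - b by tauto), if_neg h3]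

-- ===== VERDICT (by name: the statement is the Claim_ definition above) =====
theorem force_func_perturbation3_spec : Claim_equal_force_func_perturbation3 := by
  intro n _
  unfold Spec_force_func_perturbation3 force_func_perturbation3 force_func_perturbation3_alt
  conv_rhs => rw [← List.nil_append (List.flatMap _ _)]
  rw [← PySem.List.foldl_append_eq_flatMap]
  refine PySem.List.foldl_congr_mem _ _ _ _ ?_
  intro acc a _
  -- rewrite the innermost c-loop of A into a conditional single append
  have hstep : ∀ (acc : List (List Int)) (b : Int), 0 ≤ b →
      (PySem.List.pyRange 0 (b+1) 1).foldl (fun acc c =>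
        if a + b + c = n then
          if a = b ∧ b = c then acc ++ [[a, b, c, 1]]
          else if a ≠ b ∧ b ≠ c then acc ++ [[a, b, c, 6]]
          else acc ++ [[a, b, c, 3]]
        else acc) acc
      = if 0 ≤ n - a - b ∧ n - a - b ≤ b then
          acc ++ [if a = b ∧ b = n - a - b then [a, b, n - a - b, 1]
                  else if a ≠ b ∧ b ≠ n - a - b then [a, b, n - a - b, 6]
                  else [a, b, n - a - b, 3]]
        else acc := by
    intro acc b hb0
    have hbk : b + 1 = ((b.toNat + 1 : Nat) : Int) := by omega
    have hcond : ∀ (acc' : List (List Int)) (c : Int),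
        (if a + b + c = n then
          if a = b ∧ b = c then acc' ++ [[a, b, c, 1]]
          else if a ≠ b ∧ b ≠ c then acc' ++ [[a, b, c, 6]]
          else acc' ++ [[a, b, c, 3]]
         else acc')
        = (if c = n - a - b then
            acc' ++ [if a = b ∧ b = c then [a, b, c, 1]
                     else if a ≠ b ∧ b ≠ c then [a, b, c, 6]
                     else [a, b, c, 3]]
           else acc') := by
      intro acc' c
      by_cases h : a + b + c = n
      · rw [if_pos h, if_pos (show c = n - a - b by omega)]; split_ifs <;> rfl
      · rw [if_neg h, if_neg (show ¬ c = n - a - b by omega)]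
    rw [show (PySem.List.pyRange 0 (b+1) 1).foldl (fun acc c =>
          if a + b + c = n then
            if a = b ∧ b = c then acc ++ [[a, b, c, 1]]
            else if a ≠ b ∧ b ≠ c then acc ++ [[a, b, c, 6]]
            else acc ++ [[a, b, c, 3]]
          else acc) acc
        = (PySem.List.pyRange 0 (b+1) 1).foldl (fun acc c =>
            if c = n - a - b then
              acc ++ [if a = b ∧ b = c then [a, b, c, 1]
                      else if a ≠ b ∧ b ≠ c then [a, b, c, 6]
                      else [a, b, c, 3]]
            else acc) acc
        from PySem.List.foldl_congr_mem _ _ _ _ (fun acc' c _ => hcond acc' c)]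
    rw [hbk, pv_inner_fold (n - a - b)
        (fun c => [if a = b ∧ b = c then [a, b, c, 1]
                  else if a ≠ b ∧ b ≠ c then [a, b, c, 6]
                  else [a, b, c, 3]]) (b.toNat + 1) acc, ← hbk]
    by_cases h : 0 ≤ n - a - b ∧ n - a - b ≤ b
    · rw [if_pos (show 0 ≤ n - a - b ∧ n - a - b < b + 1 by omega), if_pos h]
    · rw [if_neg (show ¬(0 ≤ n - a - b ∧ n - a - b < b + 1) by omega), if_neg h]
  -- rewrite the b-loop into a conditional-interval append, then into B's subrange map
  calc (PySem.List.pyRange 0 (a+1) 1).foldl (fun acc b =>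
        (PySem.List.pyRange 0 (b+1) 1).foldl (fun acc c =>
          if a + b + c = n then
            if a = b ∧ b = c then acc ++ [[a, b, c, 1]]
            else if a ≠ b ∧ b ≠ c then acc ++ [[a, b, c, 6]]
            else acc ++ [[a, b, c, 3]]
          else acc) acc) acc
      = (PySem.List.pyRange 0 (a+1) 1).foldl (fun acc b =>
          if max 0 (-(PySem.Int.floordiv (a - n) 2)) ≤ b ∧ b ≤ min a (n - a) then
            acc ++ [if a = b ∧ b = n - a - b then [a, b, n - a - b, 1]
                    else if a ≠ b ∧ b ≠ n - a - b then [a, b, n - a - b, 6]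
                    else [a, b, n - a - b, 3]]
          else acc) acc := by
        refine PySem.List.foldl_congr_mem _ _ _ _ ?_
        intro acc' b hbmem
        obtain ⟨hb0, hba⟩ := PySem.List.mem_pyRange_one.mp hbmem
        rw [hstep acc' b hb0]
        have hfd : PySem.Int.floordiv (a - n) 2 = (a - n) / 2 :=
          PySem.Int.floordiv_eq_ediv_of_pos (by norm_num)
        by_cases h : 0 ≤ n - a - b ∧ n - a - b ≤ b
        · rw [if_pos h, if_pos (show max 0 (-(PySem.Int.floordiv (a - n) 2)) ≤ b ∧ b ≤ min a (n - a) by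
            rw [hfd]; simp only [max_le_iff, le_min_iff]; omega)]
        · rw [if_neg h, if_neg (show ¬(max 0 (-(PySem.Int.floordiv (a - n) 2)) ≤ b ∧ b ≤ min a (n - a)) by
            rw [hfd]; simp only [max_le_iff, le_min_iff]; omega)]
    _ = acc ++ (PySem.List.pyRange (max 0 (-(PySem.Int.floordiv (a - n) 2))) (min a (n - a) + 1) 1).map
          (fun b => [a, b, n - a - b, pvCoeffB a b (n - a - b)]) := by
        rw [PySem.List.foldl_append_ite
          (p := fun b => max 0 (-(PySem.Int.floordiv (a - n) 2)) ≤ b ∧ b ≤ min a (n - a))]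
        rw [pv_filter_range 0 (a+1) _ _ (le_max_left _ _) (by omega)]
        congr 1
        exact List.map_congr_left (fun b hb => pv_row_eq n a b hb)
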